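-- pv_equiv track=rewrite | github.com/moqiguzhu/Online-Judge | leetcode-python/TPC/c1/problem2.py | help1
-- ===== SOURCE A (Python) =====
-- from collections import Counter
--
-- def help1(nums):
--     cnt = 0
--     memo = {}
--     t = set(nums)
--     c = Counter(nums)
--     for e in nums:
--         if c[e] > 2:
--             return 0
--         elif e in memo:
--             pass
--         else:
--             flag = False
--             for i in range(1, e // 2+1):
--                 if (i not in t) and ((e - i) not in t) and (i != e-i):
--                     memo[e] = 1
--                     flag = True
--                     break
--             if not flag:
--                 memo[e] = 0
--         cnt += memo[e]
--     return cnt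
-- ===== SOURCE B (Python) =====
-- from collections import Counter
--
-- def help1(nums):
--     c = Counter(nums)
--     if any(v > 2 for v in c.values()):
--         return 0
--     keys = list(c)
--     total = 0
--     for e, k in c.items():
--         h = e // 2
--         bad = {x for x in keys if 1 <= x <= h}
--         bad.update(e - x for x in keys if 1 <= e - x <= h)
--         if e % 2 == 0 and h >= 1:
--             bad.add(h)
--         total += k if h > len(bad) else 0
--     return total
-- ===== Notes on version B (the rewrite author's own statement) =====
-- stated objective: faster
-- what changed: Instead of scanning i = 1..e//2 looking for a witness pair, B counts the disqualified candidates by building a set of bad i values from the O(|distinct|) value set (members, e-members, e/2) and compares its size with e//2, so the per-element cost no longer depends on the magnitude of e.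
import Mathlib
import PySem

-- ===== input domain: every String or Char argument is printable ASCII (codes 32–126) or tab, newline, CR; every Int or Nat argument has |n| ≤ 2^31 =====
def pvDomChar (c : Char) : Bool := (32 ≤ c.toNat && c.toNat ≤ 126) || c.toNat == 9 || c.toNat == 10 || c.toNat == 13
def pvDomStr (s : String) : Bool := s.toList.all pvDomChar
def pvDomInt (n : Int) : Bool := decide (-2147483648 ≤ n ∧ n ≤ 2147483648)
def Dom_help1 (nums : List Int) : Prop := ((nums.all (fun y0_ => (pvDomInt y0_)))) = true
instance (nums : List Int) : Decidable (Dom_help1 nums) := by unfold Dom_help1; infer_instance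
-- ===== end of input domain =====

-- B replaces the per-element scan of 1..e//2 by a size comparison against a set of
-- disqualified candidates built from the distinct values (objective: faster).

-- ===== PORT A =====
-- the inner 'for i in range(1, e//2+1): … break' loop (range iterated lazily, as in Python);
-- returns the value stored in memo[e]
def innerA (e : Int) (t : PySem.Set Int) (i stop : Int) : Int :=
  if _h : i < stop then
    if !(PySem.Set.contains t i) && !(PySem.Set.contains t (e - i)) && (i != e - i) then 1
    else innerA e t (i + 1) stop
  else 0
termination_by (stop - i).toNat
decreasing_by omega

-- the main 'for e in nums' loop, carrying cnt and memo; 'return 0' becomes returning 0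
def loopA (t : PySem.Set Int) (c : PySem.Dict Int Int) :
    List Int → Int → PySem.Dict Int Int → Int
  | [], cnt, _ => cnt
  | e :: rest, cnt, memo =>
    if c.getD e 0 > 2 then 0
    else if memo.contains e then loopA t c rest (cnt + memo.getD e 0) memo
    else
      let v := innerA e t 1 (PySem.Int.floordiv e 2 + 1)
      loopA t c rest (cnt + v) (memo.insert e v)

def help1 (nums : List Int) : Int :=
  loopA (PySem.Set.ofList nums) (PySem.Dict.counter nums) nums 0 PySem.Dict.empty

-- ===== PORT B =====
-- Source B's bad-candidate set: {x in keys | 1<=x<=h} ∪ {e-x | x in keys, 1<=e-x<=h} ∪ ({h} if e even, h>=1)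
def badSetB (e h : Int) (keys : List Int) : PySem.Set Int :=
  let b := PySem.Set.ofList (keys.filter (fun x => decide (1 ≤ x ∧ x ≤ h)))
  let b := PySem.Set.update b
    ((keys.filter (fun x => decide (1 ≤ e - x ∧ e - x ≤ h))).map (fun x => e - x))
  if PySem.Int.mod e 2 == 0 && h ≥ 1 then PySem.Set.add b h else b

def help1_alt (nums : List Int) : Int :=
  let c := PySem.Dict.counter nums
  if c.values.any (fun v => v > 2) then 0
  else
    let keys := c.keys
    c.items.foldl (fun total ek =>
      let h := PySem.Int.floordiv ek.1 2
      total + (if h > PySem.Set.len (badSetB ek.1 h keys) then ek.2 else 0)) 0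

-- ===== PRECONDITION & SPEC =====
def Spec_help1 (nums : List Int) (out : Int) : Prop := out = help1_alt nums
instance (nums : List Int) (out : Int) : Decidable (Spec_help1 nums out) := by unfold Spec_help1; infer_instance

-- ===== CLAIM (what is proved, stated in full; the proofs are below) =====
def Claim_equal_help1 : Prop := ∀ (nums : List Int), Dom_help1 nums → Spec_help1 nums (help1 nums)

-- ===== LEMMAS AND PROOFS =====

-- membership characterisation of B's bad set (for h = e//2)
theorem mem_badSetB (e : Int) (keys : List Int) (x : Int) :
    x ∈ badSetB e (e / 2) keys ↔
      (1 ≤ x ∧ x ≤ e / 2) ∧ (x ∈ keys ∨ (e - x) ∈ keys ∨ x = e - x) := by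
  have hmd : PySem.Int.mod e 2 = e % 2 := by simp [PySem.Int.mod, Int.fmod_eq_emod]
  unfold badSetB
  rw [hmd]
  by_cases hC : e % 2 = 0 ∧ 1 ≤ e / 2
  · rw [if_pos (by simp [hC.1, hC.2])]
    simp only [PySem.Set.mem_add, PySem.Set.mem_update, PySem.Set.mem_ofList,
      List.mem_filter, List.mem_map, decide_eq_true_eq]
    constructor
    · rintro ((⟨hk, h1, h2⟩ | ⟨y, ⟨hy, h1, h2⟩, rfl⟩) | rfl)
      · exact ⟨⟨h1, h2⟩, Or.inl hk⟩
      · exact ⟨⟨h1, h2⟩, Or.inr (Or.inl (by simpa using hy))⟩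
      · exact ⟨⟨hC.2, le_refl _⟩, Or.inr (Or.inr (by omega))⟩
    · rintro ⟨⟨h1, h2⟩, (hk | hk | hk)⟩
      · exact Or.inl (Or.inl ⟨hk, h1, h2⟩)
      · exact Or.inl (Or.inr ⟨e - x, ⟨hk, by omega, by omega⟩, by omega⟩)
      · exact Or.inr (by omega)
  · rw [if_neg (by simpa using fun h1 h2 => hC ⟨h1, h2⟩)]
    simp only [PySem.Set.mem_update, PySem.Set.mem_ofList,
      List.mem_filter, List.mem_map, decide_eq_true_eq]
    constructor
    · rintro (⟨hk, h1, h2⟩ | ⟨y, ⟨hy, h1, h2⟩, rfl⟩)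
      · exact ⟨⟨h1, h2⟩, Or.inl hk⟩
      · exact ⟨⟨h1, h2⟩, Or.inr (Or.inl (by simpa using hy))⟩
    · rintro ⟨⟨h1, h2⟩, (hk | hk | hk)⟩
      · exact Or.inl ⟨hk, h1, h2⟩
      · exact Or.inr ⟨e - x, ⟨hk, by omega, by omega⟩, by omega⟩
      · exact (hC ⟨by omega, by omega⟩).elim

theorem nodup_badSetB (e h : Int) (keys : List Int) : (badSetB e h keys).Nodup := by
  unfold badSetB
  split
  · exact PySem.Set.nodup_add _ _ (PySem.Set.nodup_update _ _ (PySem.Set.nodup_ofList _))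
  · exact PySem.Set.nodup_update _ _ (PySem.Set.nodup_ofList _)

-- proof-side list form of A's inner loop
def innerListA (e : Int) (t : PySem.Set Int) : List Int → Int
  | [] => 0
  | i :: rest =>
    if !(PySem.Set.contains t i) && !(PySem.Set.contains t (e - i)) && (i != e - i) then 1
    else innerListA e t rest

-- the counter recursion consumes exactly the lazy range
theorem innerA_eq_list (e : Int) (t : PySem.Set Int) (i stop : Int) :
    innerA e t i stop = innerListA e t (PySem.List.pyRange i stop 1) := by
  by_cases h : i < stop
  · rw [PySem.List.pyRange_one_cons h]
    unfold innerA innerListA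
    rw [dif_pos h]
    split
    · rfl
    · exact innerA_eq_list e t (i + 1) stop
  · rw [PySem.List.pyRange_one_eq_nil (by omega)]
    unfold innerA
    rw [dif_neg h]
    rfl
termination_by (stop - i).toNat
decreasing_by omega

-- A's inner scan is an 'any' over the range
theorem innerListA_eq_any (e : Int) (t : PySem.Set Int) (L : List Int) :
    innerListA e t L =
      if L.any (fun i => !(PySem.Set.contains t i) && !(PySem.Set.contains t (e - i)) && (i != e - i))
      then 1 else 0 := by
  induction L with
  | nil => rfl
  | cons i rest ih =>
    unfold innerListA
    rw [List.any_cons]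
    cases h : (!(PySem.Set.contains t i) && !(PySem.Set.contains t (e - i)) && (i != e - i)) with
    | true => simp [h]
    | false => simp [ih]

-- pointwise: A's scan result equals B's size test
theorem pointwise (e : Int) (nums : List Int) :
    innerA e (PySem.Set.ofList nums) 1 (PySem.Int.floordiv e 2 + 1) =
    (if PySem.Int.floordiv e 2 >
        PySem.Set.len (badSetB e (PySem.Int.floordiv e 2) (PySem.Set.ofList nums)) then (1:Int) else 0) := by
  have hfd : PySem.Int.floordiv e 2 = e / 2 := by simp [PySem.Int.floordiv, Int.fdiv_eq_ediv]
  rw [innerA_eq_list, hfd, innerListA_eq_any]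
  have hperm : (badSetB e (e / 2) (PySem.Set.ofList nums)).Perm
      ((PySem.List.pyRange 1 (e / 2 + 1) 1).filter
        (fun x => (PySem.Set.ofList nums).contains x || (PySem.Set.ofList nums).contains (e - x) || (x == e - x))) := by
    apply (List.perm_ext_iff_of_nodup (nodup_badSetB e _ _)
      (List.Nodup.filter _ (PySem.List.nodup_pyRange_one _ _))).mpr
    intro x
    rw [mem_badSetB, List.mem_filter, PySem.List.mem_pyRange_one]
    simp only [Bool.or_eq_true, PySem.Set.contains_iff, PySem.Set.mem_ofList, beq_iff_eq]
    constructor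
    · rintro ⟨⟨h1, h2⟩, hk⟩; exact ⟨⟨h1, by omega⟩, or_assoc.mpr hk⟩
    · rintro ⟨⟨h1, h2⟩, hk⟩; exact ⟨⟨h1, by omega⟩, or_assoc.mp hk⟩
  have hlen : PySem.Set.len (badSetB e (e / 2) (PySem.Set.ofList nums)) =
      (((PySem.List.pyRange 1 (e / 2 + 1) 1).filter
        (fun x => (PySem.Set.ofList nums).contains x || (PySem.Set.ofList nums).contains (e - x) || (x == e - x))).length : Int) := by
    simp [PySem.Set.len, hperm.length_eq]
  rw [hlen]
  set L : List Int := PySem.List.pyRange 1 (e / 2 + 1) 1 with hL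
  set P : Int → Bool := fun x => (PySem.Set.ofList nums).contains x || (PySem.Set.ofList nums).contains (e - x) || (x == e - x) with hP
  have hLlen : L.length = (e / 2).toNat := by
    rw [hL, PySem.List.length_pyRange_one]; omega
  have hany : (L.any fun i => !(PySem.Set.ofList nums).contains i && !(PySem.Set.ofList nums).contains (e - i) && (i != e - i))
      = L.any (fun i => !(P i)) := by
    apply PySem.List.any_congr_mem
    intro i _
    simp [hP, bne]
  rw [hany]
  have hle : (L.filter P).length ≤ L.length := List.length_filter_le _ _
  have hkey : (L.any fun i => !(P i)) = true ↔ ((L.filter P).length : Int) < e / 2 := by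
    constructor
    · intro hex
      rcases List.any_eq_true.mp hex with ⟨i, hiL, hiP⟩
      have hlt : (L.filter P).length < L.length :=
        List.length_filter_lt_length_iff_exists.mpr ⟨i, hiL, by simpa using hiP⟩
      have hpos : (0:Int) < e / 2 := by
        have hm := hiL
        rw [hL, PySem.List.mem_pyRange_one] at hm
        omega
      omega
    · intro hlt
      have hne : (L.filter P).length ≠ L.length := by omega
      have hnall : ¬ ∀ i ∈ L, P i := by
        intro hall
        exact hne (List.length_filter_eq_length_iff.mpr hall)
      push_neg at hnall
      rcases hnall with ⟨i, hiL, hiP⟩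
      exact List.any_eq_true.mpr ⟨i, hiL, by simpa using hiP⟩
  by_cases hc : ((L.filter P).length : Int) < e / 2
  · rw [if_pos (hkey.mpr hc), if_pos hc]
  · rw [if_neg (fun hx => hc (hkey.mp hx)), if_neg hc]

-- A's loop when some element occurs more than twice: result 0
theorem loopA_zero (t : PySem.Set Int) (c : PySem.Dict Int Int) (l : List Int)
    (cnt : Int) (memo : PySem.Dict Int Int)
    (hex : ∃ e ∈ l, c.getD e 0 > 2) : loopA t c l cnt memo = 0 := by
  induction l generalizing cnt memo with
  | nil => simp at hex
  | cons e rest ih =>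
    simp only [loopA]
    by_cases hg : c.getD e 0 > 2
    · simp [hg]
    · have hex' : ∃ x ∈ rest, c.getD x 0 > 2 := by
        rcases hex with ⟨x, hx, hxc⟩
        rcases List.mem_cons.mp hx with rfl | hx'
        · exact absurd hxc hg
        · exact ⟨x, hx', hxc⟩
      by_cases hm : memo.contains e = true <;> simp [hg, hm, ih _ _ hex']

-- A's loop when no element occurs more than twice: cnt plus the sum of the per-element indicators
theorem loopA_sum (t : PySem.Set Int) (c : PySem.Dict Int Int) (l : List Int)
    (cnt : Int) (memo : PySem.Dict Int Int)
    (hc : ∀ e ∈ l, ¬ c.getD e 0 > 2)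
    (ind : Int → Int)
    (hind : ∀ e, ind e = innerA e t 1 (PySem.Int.floordiv e 2 + 1))
    (hmemo : ∀ e, memo.contains e = true → memo.getD e 0 = ind e) :
    loopA t c l cnt memo = cnt + (l.map ind).sum := by
  induction l generalizing cnt memo with
  | nil => simp [loopA]
  | cons e rest ih =>
    have hce : ¬ c.getD e 0 > 2 := hc e (List.mem_cons_self)
    have hcr : ∀ x ∈ rest, ¬ c.getD x 0 > 2 := fun x hx => hc x (List.mem_cons_of_mem _ hx)
    simp only [loopA, hce, if_false]
    by_cases hm : memo.contains e = true
    · rw [if_pos hm, hmemo e hm, ih _ _ hcr hmemo]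
      simp; ring
    · rw [if_neg hm]
      have hmemo' : ∀ x, (memo.insert e (innerA e t 1 (PySem.Int.floordiv e 2 + 1))).contains x = true →
          (memo.insert e (innerA e t 1 (PySem.Int.floordiv e 2 + 1))).getD x 0 = ind x := by
        intro x hx
        by_cases hxe : x = e
        · subst hxe; rw [PySem.Dict.getD_insert_self, hind]
        · rw [PySem.Dict.getD_insert_of_ne _ _ _ hxe]
          apply hmemo
          rw [PySem.Dict.contains_insert] at hx
          simpa [hxe] using hx
      rw [ih _ _ hcr hmemo']
      rw [← hind e]; simp; ring

-- multiplicity: a sum over the list equals the count-weighted sum over its distinct values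
theorem sum_count (l : List Int) (f : Int → Int) :
    (l.map f).sum = ((PySem.Set.ofList l).map (fun k => (l.count k : Int) * f k)).sum := by
  rw [Finset.sum_list_map_count]
  have hts : (PySem.Set.ofList l).toFinset = l.toFinset := by
    ext x
    simp [List.mem_toFinset, PySem.Set.mem_ofList]
  rw [← List.sum_toFinset _ (PySem.Set.nodup_ofList l), hts]
  apply Finset.sum_congr rfl
  intro m _
  simp

-- the Counter values test matches the existence of an element with count > 2
theorem values_any (nums : List Int) :
    ((PySem.Dict.counter nums).values.any fun v => v > 2) = true ↔
      ∃ e ∈ nums, (PySem.Dict.counter nums).getD e 0 > 2 := by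
  have hv : (PySem.Dict.counter nums).values
      = ((PySem.Set.ofList nums).map (fun k => (nums.count k : Int))) := by
    simp only [PySem.Dict.values, PySem.Dict.items_counter, List.map_map]
    rfl
  rw [hv]
  simp only [List.any_eq_true, List.mem_map, PySem.Set.mem_ofList]
  constructor
  · rintro ⟨v, ⟨k, hk, rfl⟩, hgt⟩
    exact ⟨k, hk, by rw [PySem.Dict.getD_counter]; simpa using hgt⟩
  · rintro ⟨e, he, hgt⟩
    rw [PySem.Dict.getD_counter] at hgt
    exact ⟨(nums.count e : Int), ⟨e, he, rfl⟩, by simpa using hgt⟩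

-- ===== VERDICT (by name: the statement is the Claim_ definition above) =====
theorem help1_spec : Claim_equal_help1 := by
  intro nums _
  unfold Spec_help1 help1 help1_alt
  simp only []
  by_cases hex : ∃ e ∈ nums, (PySem.Dict.counter nums).getD e 0 > 2
  · rw [loopA_zero _ _ _ _ _ hex, if_pos (values_any nums |>.mpr hex)]
  · rw [if_neg (fun hx => hex ((values_any nums).mp hx))]
    rw [loopA_sum (PySem.Set.ofList nums) (PySem.Dict.counter nums) nums 0 PySem.Dict.empty
      (by simpa using hex)
      (fun e => innerA e (PySem.Set.ofList nums) 1 (PySem.Int.floordiv e 2 + 1))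
      (fun _ => rfl)
      (by intro e he; rw [PySem.Dict.contains_empty] at he; exact absurd he (by simp))]
    rw [PySem.List.foldl_add _ (fun ek : Int × Int =>
      if PySem.Int.floordiv ek.1 2 >
          PySem.Set.len (badSetB ek.1 (PySem.Int.floordiv ek.1 2) (PySem.Dict.counter nums).keys)
        then ek.2 else 0)]
    rw [PySem.Dict.items_counter, PySem.Dict.keys_counter, List.map_map]
    rw [zero_add, zero_add]
    rw [sum_count nums]
    congr 1
    apply List.map_congr_left
    intro k _
    simp only [Function.comp]
    rw [pointwise k nums]
    by_cases hc : PySem.Int.floordiv k 2 >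
        PySem.Set.len (badSetB k (PySem.Int.floordiv k 2) (PySem.Set.ofList nums))
    · rw [if_pos hc, if_pos hc]; ring
    · rw [if_neg hc, if_neg hc]; ring
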